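-- pv_equiv track=rewrite | github.com/yizou1104/Number-System-Repository | Basque_Converter.py | number_to_basque
-- ===== SOURCE A (Python) =====
-- ATOMS = {
--     0: "zero",
--     1: "bat",
--     2: "bi",
--     3: "hiru",
--     4: "lau",
--     5: "bost",
--     6: "sei",
--     7: "zazpi",
--     8: "zortzi",
--     9: "bederatzi",
--     10: "hamar",
--     11: "hamaika",
--     12: "hamabi",
--     13: "hamahiru",
--     14: "hamalau",
--     15: "hamabost",
--     16: "hamasei",
--     17: "hamazazpi",
--     18: "hemezortzi",
--     19: "hemeretzi",
-- }
--
-- TWENTIES_MAP = {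
--     1: "hogei",
--     2: "berrogei",
--     3: "hirurogei",
--     4: "laurogei",
-- }
--
-- HUNDREDS_MAP = {
--     1: "ehun",
--     2: "berrehun",
--     3: "hirurehun",
--     4: "laurehun",
--     5: "bostehun",
--     6: "seiehun",
--     7: "zazpiehun",
--     8: "zortziehun",
--     9: "bederatziehun",
-- }
--
-- THOUSAND = "mila"
--
-- def additive(x, y):
--     """x + y (additive construction)"""
--     return f"{x} eta {y}"
--
-- def multiplicative(x, base):
--     """x × base (multiplicative construction)"""
--     return f"{x} {base}"
--
-- def number_to_basque(n):
--     """
--     Convert a non‑negative integer to standard Basque numeral (Batua).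
--     """
--     if n < 0:
--         raise ValueError("Negative numbers are not supported")
--
--     # ---- Atomic (0–19) ----
--     if n in ATOMS:
--         return ATOMS[n]
--
--     # ---- Thousands (≥ 1000) ----
--     if n >= 1000:
--         thousands = n // 1000
--         remainder = n % 1000
--         if thousands == 1:
--             head = THOUSAND
--         else:
--             head = multiplicative(number_to_basque(thousands), THOUSAND)
--         if remainder == 0:
--             return head
--         else:
--             return additive(head, number_to_basque(remainder))
--
--     # ---- Hundreds (100–999) ----
--     if n >= 100:
--         hundreds = n // 100
--         remainder = n % 100
--         head = HUNDREDS_MAP[hundreds]          # fused form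
--         if remainder == 0:
--             return head
--         else:
--             return additive(head, number_to_basque(remainder))
--
--     # ---- Vigesimal (20–99) ----
--     # (numbers 20–99 are handled here; note that 40,60,80 are included)
--     if n >= 20:
--         twenties = n // 20
--         remainder = n % 20
--         head = TWENTIES_MAP[twenties]          # fused vigesimal base
--         if remainder == 0:
--             return head
--         else:
--             return additive(head, number_to_basque(remainder))
--
--     # Should never reach here because 0–19 already covered
--     raise RuntimeError(f"Unexpected number: {n}")
-- ===== SOURCE B (Python) =====
-- ATOMS = {
--     0: "zero", 1: "bat", 2: "bi", 3: "hiru", 4: "lau", 5: "bost", 6: "sei",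
--     7: "zazpi", 8: "zortzi", 9: "bederatzi", 10: "hamar", 11: "hamaika",
--     12: "hamabi", 13: "hamahiru", 14: "hamalau", 15: "hamabost", 16: "hamasei",
--     17: "hamazazpi", 18: "hemezortzi", 19: "hemeretzi",
-- }
-- TWENTIES_MAP = {1: "hogei", 2: "berrogei", 3: "hirurogei", 4: "laurogei"}
-- HUNDREDS_MAP = {
--     1: "ehun", 2: "berrehun", 3: "hirurehun", 4: "laurehun", 5: "bostehun",
--     6: "seiehun", 7: "zazpiehun", 8: "zortziehun", 9: "bederatziehun",
-- }
-- THOUSAND = "mila"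
--
-- def _sub_thousand_pieces(n):
--     """Place-value words of a sub-thousand value, most significant first."""
--     pieces = []
--     if n >= 100:
--         pieces.append(HUNDREDS_MAP[n // 100])
--         n %= 100
--     if n >= 20:
--         pieces.append(TWENTIES_MAP[n // 20])
--         n %= 20
--     if n:
--         pieces.append(ATOMS[n])
--     return pieces
--
-- def number_to_basque(n):
--     if n < 0:
--         raise ValueError("Negative numbers are not supported")
--     if n in ATOMS:
--         return ATOMS[n]
--     if n >= 1000:
--         thousands, rem = divmod(n, 1000)
--         head = THOUSAND if thousands == 1 else f"{number_to_basque(thousands)} {THOUSAND}"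
--         return " eta ".join([head] + _sub_thousand_pieces(rem))
--     return " eta ".join(_sub_thousand_pieces(n))
-- ===== Notes on version B (the rewrite author's own statement) =====
-- stated objective: alternative
-- what changed: Replaces A's cascade of nested additive/multiplicative string recursions by collecting the place-value words (thousands head, hundred, twenty, atom) in one list and joining it with ' eta '; only the thousands count is converted recursively.
import Mathlib
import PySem

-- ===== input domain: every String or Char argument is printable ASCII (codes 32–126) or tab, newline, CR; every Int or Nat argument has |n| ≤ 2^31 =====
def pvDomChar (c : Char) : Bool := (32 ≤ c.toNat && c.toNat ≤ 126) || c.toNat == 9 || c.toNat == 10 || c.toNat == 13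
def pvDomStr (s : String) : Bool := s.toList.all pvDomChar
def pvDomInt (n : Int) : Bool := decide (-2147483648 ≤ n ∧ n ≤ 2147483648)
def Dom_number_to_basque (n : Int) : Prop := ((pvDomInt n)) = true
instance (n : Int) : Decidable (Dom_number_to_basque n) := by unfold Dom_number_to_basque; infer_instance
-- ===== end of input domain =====

-- B replaces A's chain of nested additive/multiplicative recursions by one pass that collects
-- the place-value words in a list and joins them with " eta " (objective: alternative decomposition).
-- A raises ValueError on negative input; those inputs are outside Pre_.

-- ===== PORT A =====
-- shared literal tables (the module-level dicts ATOMS / TWENTIES_MAP / HUNDREDS_MAP)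
def atomsMap (m : Int) : String :=
  if m = 0 then "zero" else if m = 1 then "bat" else if m = 2 then "bi"
  else if m = 3 then "hiru" else if m = 4 then "lau" else if m = 5 then "bost"
  else if m = 6 then "sei" else if m = 7 then "zazpi" else if m = 8 then "zortzi"
  else if m = 9 then "bederatzi" else if m = 10 then "hamar" else if m = 11 then "hamaika"
  else if m = 12 then "hamabi" else if m = 13 then "hamahiru" else if m = 14 then "hamalau"
  else if m = 15 then "hamabost" else if m = 16 then "hamasei" else if m = 17 then "hamazazpi"
  else if m = 18 then "hemezortzi" else if m = 19 then "hemeretzi" else ""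

def twentiesMap (m : Int) : String :=
  if m = 1 then "hogei" else if m = 2 then "berrogei"
  else if m = 3 then "hirurogei" else if m = 4 then "laurogei" else ""

def hundredsMap (m : Int) : String :=
  if m = 1 then "ehun" else if m = 2 then "berrehun" else if m = 3 then "hirurehun"
  else if m = 4 then "laurehun" else if m = 5 then "bostehun" else if m = 6 then "seiehun"
  else if m = 7 then "zazpiehun" else if m = 8 then "zortziehun"
  else if m = 9 then "bederatziehun" else ""

-- additive(x, y) / multiplicative(x, base)
def pyAdditive (x y : String) : String := x ++ " eta " ++ y
def pyMultiplicative (x base : String) : String := x ++ " " ++ base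

-- literal port of A ("" where the Python raises: n < 0, and the unreachable RuntimeError)
def number_to_basque (n : Int) : String :=
  if _h0 : n < 0 then ""   -- raise ValueError
  else if 0 ≤ n ∧ n ≤ 19 then atomsMap n
  else if _h1 : n ≥ 1000 then
    let thousands := PySem.Int.floordiv n 1000
    let remainder := PySem.Int.mod n 1000
    let head := if thousands = 1 then "mila" else pyMultiplicative (number_to_basque thousands) "mila"
    if remainder = 0 then head else pyAdditive head (number_to_basque remainder)
  else if _h2 : n ≥ 100 then
    let hundreds := PySem.Int.floordiv n 100
    let remainder := PySem.Int.mod n 100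
    let head := hundredsMap hundreds
    if remainder = 0 then head else pyAdditive head (number_to_basque remainder)
  else if _h3 : n ≥ 20 then
    let twenties := PySem.Int.floordiv n 20
    let remainder := PySem.Int.mod n 20
    let head := twentiesMap twenties
    if remainder = 0 then head else pyAdditive head (number_to_basque remainder)
  else ""   -- raise RuntimeError (unreachable)
termination_by n.toNat
decreasing_by
  · have h := PySem.Int.floordiv_eq_ediv_of_pos (a := n) (b := 1000) (by omega)
    rw [h]; omega
  · have h := PySem.Int.mod_eq_emod_of_pos (a := n) (b := 1000) (by omega)
    rw [h]; omega
  · have h := PySem.Int.mod_eq_emod_of_pos (a := n) (b := 100) (by omega)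
    rw [h]; omega
  · have h := PySem.Int.mod_eq_emod_of_pos (a := n) (b := 20) (by omega)
    rw [h]; omega

-- ===== PORT B =====
-- _sub_thousand_pieces
def subThousandPieces (n : Int) : List String :=
  let (p1, n1) := if n ≥ 100 then ([hundredsMap (PySem.Int.floordiv n 100)], PySem.Int.mod n 100)
                  else ([], n)
  let (p2, n2) := if n1 ≥ 20 then (p1 ++ [twentiesMap (PySem.Int.floordiv n1 20)], PySem.Int.mod n1 20)
                  else (p1, n1)
  if n2 ≠ 0 then p2 ++ [atomsMap n2] else p2

def number_to_basque_alt (n : Int) : String :=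
  if _h0 : n < 0 then ""   -- raise ValueError
  else if 0 ≤ n ∧ n ≤ 19 then atomsMap n
  else if _h1 : n ≥ 1000 then
    let thousands := PySem.Int.floordiv n 1000
    let rem := PySem.Int.mod n 1000
    let head := if thousands = 1 then "mila" else number_to_basque_alt thousands ++ " " ++ "mila"
    PySem.Str.join " eta " ([head] ++ subThousandPieces rem)
  else PySem.Str.join " eta " (subThousandPieces n)
termination_by n.toNat
decreasing_by
  have h := PySem.Int.floordiv_eq_ediv_of_pos (a := n) (b := 1000) (by omega)
  rw [h]; omega

-- ===== PRECONDITION & SPEC =====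
-- Pre_ excludes exactly the negative inputs, where A raises ValueError.
def Pre_number_to_basque (n : Int) : Prop := 0 ≤ n
instance (n : Int) : Decidable (Pre_number_to_basque n) := by unfold Pre_number_to_basque; infer_instance
def pvWitness_number_to_basque : Int := (2024)

def Spec_number_to_basque (n : Int) (out : String) : Prop := out = number_to_basque_alt n
instance (n : Int) (out : String) : Decidable (Spec_number_to_basque n out) := by unfold Spec_number_to_basque; infer_instance

-- ===== CLAIM (what is proved, stated in full; the proofs are below) =====
def Claim_equal_number_to_basque : Prop := ∀ (n : Int), Dom_number_to_basque n → Pre_number_to_basque n → Spec_number_to_basque n (number_to_basque n)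

-- ===== LEMMAS AND PROOFS =====

theorem join_cons (s a : String) (l : List String) (h : l ≠ []) :
    PySem.Str.join s (a :: l) = a ++ s ++ PySem.Str.join s l := by
  obtain ⟨x, l', rfl⟩ := List.exists_cons_of_ne_nil h
  apply String.toList_inj.mp
  simp only [PySem.Str.toList_join, List.map_cons, PySem.Chars.join_cons_cons,
    String.toList_append]

theorem join_single (s a : String) : PySem.Str.join s [a] = a := by
  apply String.toList_inj.mp
  simp only [PySem.Str.toList_join, List.map_cons, List.map_nil, PySem.Chars.join_singleton]

theorem atoms_range (n : Int) (h0 : 0 ≤ n) (h19 : n ≤ 19) :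
    number_to_basque n = atomsMap n := by
  rw [number_to_basque]
  rw [dif_neg (by omega : ¬ n < 0), if_pos (⟨h0, h19⟩ : (0:Int) ≤ n ∧ n ≤ 19)]

theorem alt_small (n : Int) (h0 : 0 ≤ n) (h19 : n ≤ 19) :
    number_to_basque_alt n = atomsMap n := by
  rw [number_to_basque_alt]
  rw [dif_neg (by omega : ¬ n < 0), if_pos (⟨h0, h19⟩ : (0:Int) ≤ n ∧ n ≤ 19)]

theorem subT_small (n : Int) (h0 : 0 ≤ n) (h19 : n ≤ 19) :
    subThousandPieces n = if n = 0 then [] else [atomsMap n] := by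
  rw [subThousandPieces]
  rw [if_neg (by omega : ¬ n ≥ 100)]
  simp only
  rw [if_neg (by omega : ¬ n ≥ 20)]
  simp only
  by_cases h : n = 0
  · rw [if_neg (by simpa using h), if_pos h]
  · rw [if_pos h, if_neg h]; rfl

theorem subT_twenties (n : Int) (h : 20 ≤ n) (h2 : n ≤ 99) :
    subThousandPieces n =
      twentiesMap (PySem.Int.floordiv n 20) :: subThousandPieces (PySem.Int.mod n 20) := by
  have hr0 : 0 ≤ PySem.Int.mod n 20 := PySem.Int.mod_nonneg n (by omega)
  have hr1 : PySem.Int.mod n 20 < 20 := PySem.Int.mod_lt n (by omega)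
  rw [subT_small _ hr0 (by omega), subThousandPieces]
  rw [if_neg (by omega : ¬ n ≥ 100)]
  simp only
  rw [if_pos (by omega : n ≥ 20)]
  simp only [List.nil_append]
  by_cases h0 : PySem.Int.mod n 20 = 0
  · rw [if_neg (by simpa using h0), if_pos h0]
  · rw [if_pos h0, if_neg h0]; rfl

theorem subT_hundreds (n : Int) (h : 100 ≤ n) (h999 : n ≤ 999) :
    subThousandPieces n =
      hundredsMap (PySem.Int.floordiv n 100) :: subThousandPieces (PySem.Int.mod n 100) := by
  have hr0 : 0 ≤ PySem.Int.mod n 100 := PySem.Int.mod_nonneg n (by omega)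
  have hr1 : PySem.Int.mod n 100 < 100 := PySem.Int.mod_lt n (by omega)
  conv_lhs => rw [subThousandPieces]
  rw [if_pos (by omega : n ≥ 100)]
  simp only
  conv_rhs => rw [subThousandPieces]
  rw [if_neg (by omega : ¬ PySem.Int.mod n 100 ≥ 100)]
  simp only
  by_cases h20 : PySem.Int.mod n 100 ≥ 20
  · rw [if_pos h20, if_pos h20]
    simp only [List.nil_append]
    by_cases h0 : PySem.Int.mod (PySem.Int.mod n 100) 20 = 0
    · rw [if_neg (by simpa using h0), if_neg (by simpa using h0)]; rfl
    · rw [if_pos h0, if_pos h0]; rfl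
  · rw [if_neg h20, if_neg h20]
    by_cases h0 : PySem.Int.mod n 100 = 0
    · rw [if_neg (by simpa using h0), if_neg (by simpa using h0)]
    · rw [if_pos h0, if_pos h0]; rfl

theorem subT_ne_nil (n : Int) (h : 1 ≤ n) (h999 : n ≤ 999) : subThousandPieces n ≠ [] := by
  by_cases hh : 100 ≤ n
  · rw [subT_hundreds n hh h999]; simp
  · by_cases ht : 20 ≤ n
    · rw [subT_twenties n ht (by omega)]; simp
    · rw [subT_small n (by omega) (by omega), if_neg (by omega : ¬ n = 0)]; simp

theorem pieces_eq_aux (k : Nat) : ∀ (n : Int), n.toNat = k → 1 ≤ n → n ≤ 999 →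
    number_to_basque n = PySem.Str.join " eta " (subThousandPieces n) := by
  induction k using Nat.strong_induction_on with
  | _ k ih =>
    intro n hk h1 h999
    by_cases h19 : n ≤ 19
    · rw [atoms_range n (by omega) h19, subT_small n (by omega) h19,
        if_neg (by omega : ¬ n = 0), join_single]
    · by_cases h99 : n ≤ 99
      · -- 20 ≤ n ≤ 99
        have hr0 : 0 ≤ PySem.Int.mod n 20 := PySem.Int.mod_nonneg n (by omega)
        have hr1 : PySem.Int.mod n 20 < 20 := PySem.Int.mod_lt n (by omega)
        rw [number_to_basque]
        rw [dif_neg (by omega : ¬ n < 0), if_neg (by omega : ¬ ((0:Int) ≤ n ∧ n ≤ 19)),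
          dif_neg (by omega : ¬ n ≥ 1000), dif_neg (by omega : ¬ n ≥ 100),
          dif_pos (by omega : n ≥ 20)]
        simp only
        rw [subT_twenties n (by omega) h99]
        by_cases h0 : PySem.Int.mod n 20 = 0
        · rw [if_pos h0, h0, subT_small 0 le_rfl (by omega), if_pos rfl, join_single]
        · rw [if_neg h0, join_cons _ _ _ (by
            rw [subT_small _ hr0 (by omega), if_neg h0]; simp)]
          rw [subT_small _ hr0 (by omega), if_neg h0, join_single,
            atoms_range _ hr0 (by omega)]
          rfl
      · -- 100 ≤ n ≤ 999
        have hr0 : 0 ≤ PySem.Int.mod n 100 := PySem.Int.mod_nonneg n (by omega)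
        have hr1 : PySem.Int.mod n 100 < 100 := PySem.Int.mod_lt n (by omega)
        have hmodeq : PySem.Int.mod n 100 = n % 100 := PySem.Int.mod_eq_emod_of_pos (by omega)
        rw [number_to_basque]
        rw [dif_neg (by omega : ¬ n < 0), if_neg (by omega : ¬ ((0:Int) ≤ n ∧ n ≤ 19)),
          dif_neg (by omega : ¬ n ≥ 1000), dif_pos (by omega : n ≥ 100)]
        simp only
        rw [subT_hundreds n (by omega) (by omega)]
        by_cases h0 : PySem.Int.mod n 100 = 0
        · rw [if_pos h0, h0, subT_small 0 le_rfl (by omega), if_pos rfl, join_single]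
        · rw [if_neg h0, join_cons _ _ _ (subT_ne_nil _ (by omega) (by omega))]
          rw [ih (PySem.Int.mod n 100).toNat (by omega) _ rfl (by omega) (by omega)]
          rfl

theorem pieces_eq (n : Int) (h1 : 1 ≤ n) (h999 : n ≤ 999) :
    number_to_basque n = PySem.Str.join " eta " (subThousandPieces n) :=
  pieces_eq_aux n.toNat n rfl h1 h999

theorem alt_low (n : Int) (h1 : 1 ≤ n) (h999 : n ≤ 999) :
    number_to_basque_alt n = PySem.Str.join " eta " (subThousandPieces n) := by
  by_cases h19 : n ≤ 19
  · rw [alt_small n (by omega) h19, subT_small n (by omega) h19,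
      if_neg (by omega : ¬ n = 0), join_single]
  · rw [number_to_basque_alt]
    rw [dif_neg (by omega : ¬ n < 0), if_neg (by omega : ¬ ((0:Int) ≤ n ∧ n ≤ 19)),
      dif_neg (by omega : ¬ n ≥ 1000)]

theorem main_eq (k : Nat) : ∀ (n : Int), n.toNat = k → 0 ≤ n →
    number_to_basque n = number_to_basque_alt n := by
  induction k using Nat.strong_induction_on with
  | _ k ih =>
    intro n hk h0
    by_cases h19 : n ≤ 19
    · rw [atoms_range n h0 h19, alt_small n h0 h19]
    · by_cases h999 : n ≤ 999
      · rw [pieces_eq n (by omega) h999, alt_low n (by omega) h999]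
      · -- n ≥ 1000
        have hdiveq : PySem.Int.floordiv n 1000 = n / 1000 :=
          PySem.Int.floordiv_eq_ediv_of_pos (by omega)
        have hmodeq : PySem.Int.mod n 1000 = n % 1000 := PySem.Int.mod_eq_emod_of_pos (by omega)
        have hr0 : 0 ≤ PySem.Int.mod n 1000 := PySem.Int.mod_nonneg n (by omega)
        have hr1 : PySem.Int.mod n 1000 < 1000 := PySem.Int.mod_lt n (by omega)
        rw [number_to_basque, number_to_basque_alt]
        rw [dif_neg (by omega : ¬ n < 0), if_neg (by omega : ¬ ((0:Int) ≤ n ∧ n ≤ 19)),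
          dif_pos (by omega : n ≥ 1000), dif_neg (by omega : ¬ n < 0),
          if_neg (by omega : ¬ ((0:Int) ≤ n ∧ n ≤ 19)), dif_pos (by omega : n ≥ 1000)]
        simp only
        have hhead : (if PySem.Int.floordiv n 1000 = 1 then "mila"
            else pyMultiplicative (number_to_basque (PySem.Int.floordiv n 1000)) "mila")
            = (if PySem.Int.floordiv n 1000 = 1 then "mila"
            else number_to_basque_alt (PySem.Int.floordiv n 1000) ++ " " ++ "mila") := by
          by_cases ht1 : PySem.Int.floordiv n 1000 = 1
          · rw [if_pos ht1, if_pos ht1]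
          · rw [if_neg ht1, if_neg ht1]
            rw [pyMultiplicative,
              ih (PySem.Int.floordiv n 1000).toNat (by omega) _ rfl (by omega)]
        rw [hhead]
        by_cases hrem : PySem.Int.mod n 1000 = 0
        · rw [if_pos hrem, hrem, subT_small 0 le_rfl (by omega), if_pos rfl]
          rw [show ([(if PySem.Int.floordiv n 1000 = 1 then "mila"
              else number_to_basque_alt (PySem.Int.floordiv n 1000) ++ " " ++ "mila")] ++ [] :
              List String) = [_] from List.append_nil _, join_single]
        · rw [if_neg hrem, pyAdditive,
            pieces_eq (PySem.Int.mod n 1000) (by omega) (by omega)]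
          rw [List.singleton_append,
            join_cons _ _ _ (subT_ne_nil _ (by omega) (by omega))]

-- ===== VERDICT (by name: the statement is the Claim_ definition above) =====
theorem number_to_basque_spec : Claim_equal_number_to_basque := by
  intro n _ hpre
  exact main_eq n.toNat n rfl hpre
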